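-- pv_equiv track=rewrite | github.com/HomoYouDidnt/kloros | src/cognition/meta_cognition/analyzers/semantic_analyzer.py | _count_interruptions
-- ===== SOURCE A (Python) =====
-- from typing import Dict, Any, List, Optional
--
-- def _count_interruptions(events: List[Dict[str, Any]]) -> int:
--     """Count conversation interruptions (consecutive user inputs)."""
--
--     interruptions = 0
--     last_type = None
--
--     for event in events:
--         if event['type'] == 'user_input' and last_type == 'user_input':
--             interruptions += 1
--         last_type = event['type']
--
--     return interruptions
-- ===== SOURCE B (Python) =====
-- from typing import Dict, Any, List
--
-- def _count_interruptions(events: List[Dict[str, Any]]) -> int: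
--     """Count conversation interruptions (consecutive user inputs)."""
--     types = [event['type'] for event in events]
--     total = 0
--     ts = types
--     while ts:
--         head = ts[0]
--         k = 1
--         while k < len(ts) and ts[k] == head:
--             k += 1
--         if head == 'user_input':
--             total += k - 1
--         ts = ts[k:]
--     return total
-- ===== Notes on version B (the rewrite author's own statement) =====
-- stated objective: alternative
-- what changed: Replaces A's stateful previous-element pass with a run-length grouping: project the type sequence, split it into maximal runs of equal types, and sum length-1 over runs of 'user_input'.
import Mathlib
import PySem

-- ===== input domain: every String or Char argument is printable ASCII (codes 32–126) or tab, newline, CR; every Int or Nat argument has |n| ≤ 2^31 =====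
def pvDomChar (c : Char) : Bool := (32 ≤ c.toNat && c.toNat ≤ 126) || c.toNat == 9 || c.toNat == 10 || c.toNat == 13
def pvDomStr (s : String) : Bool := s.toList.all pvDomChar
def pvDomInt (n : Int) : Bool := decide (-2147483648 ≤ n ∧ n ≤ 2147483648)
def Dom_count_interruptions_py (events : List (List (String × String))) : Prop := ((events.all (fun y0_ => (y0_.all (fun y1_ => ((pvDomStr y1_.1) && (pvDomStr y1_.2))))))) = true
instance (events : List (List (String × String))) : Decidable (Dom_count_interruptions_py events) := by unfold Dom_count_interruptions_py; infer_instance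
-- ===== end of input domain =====

-- B replaces A's stateful previous-element pass by run-length grouping of the type
-- sequence: sum (run length - 1) over maximal runs of 'user_input' (alternative; same cost).

-- ===== PORT A =====
-- event['type'] raises KeyError when the key is missing; Pre_ excludes exactly those
-- inputs, so inside Pre_ the getD with a dummy default is exact.
def pvALoop : List (List (String × String)) → Int → Option String → Int
  | [], interruptions, _ => interruptions
  | e :: rest, interruptions, last =>
    let t := (PySem.Dict.mk e).getD "type" ""
    pvALoop rest
      (if t = "user_input" ∧ last = some "user_input" then interruptions + 1 else interruptions)
      (some t)

def count_interruptions_py (events : List (List (String × String))) : Int :=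
  pvALoop events 0 none

-- ===== PORT B =====
-- B's inner 'while k < len(ts) and ts[k] == head' scan of the leading run is exactly
-- takeWhile/dropWhile on the tail; 'ts = ts[k:]' is the dropWhile remainder.
def pvRuns : List String → Int
  | [] => 0
  | t :: rest =>
    (if t = "user_input" then ((rest.takeWhile (· == t)).length : Int) else 0)
      + pvRuns (rest.dropWhile (· == t))
termination_by ts => ts.length
decreasing_by
  simp only [List.length_cons]
  exact Nat.lt_succ_of_le (List.length_dropWhile_le _ _)

def count_interruptions_py_alt (events : List (List (String × String))) : Int :=
  pvRuns (events.map (fun e => (PySem.Dict.mk e).getD "type" ""))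

-- ===== PRECONDITION & SPEC =====
-- Pre_ excludes exactly the inputs where the Python A raises KeyError (an event without a 'type' key).
def Pre_count_interruptions_py (events : List (List (String × String))) : Prop :=
  ∀ e ∈ events, "type" ∈ e.map Prod.fst
instance (events : List (List (String × String))) : Decidable (Pre_count_interruptions_py events) := by unfold Pre_count_interruptions_py; infer_instance

def pvWitness_count_interruptions_py : (List (List (String × String))) :=
  [[("type", "user_input")], [("type", "user_input")], [("type", "system")]]

def Spec_count_interruptions_py (events : List (List (String × String))) (out : Int) : Prop := out = count_interruptions_py_alt events
instance (events : List (List (String × String))) (out : Int) : Decidable (Spec_count_interruptions_py events out) := by unfold Spec_count_interruptions_py; infer_instance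

-- ===== CLAIM (what is proved, stated in full; the proofs are below) =====
def Claim_equal_count_interruptions_py : Prop := ∀ (events : List (List (String × String))), Dom_count_interruptions_py events → Pre_count_interruptions_py events → Spec_count_interruptions_py events (count_interruptions_py events)

-- ===== LEMMAS AND PROOFS =====

-- A's loop, abstracted to the projected type sequence
def pvG : List String → Option String → Int
  | [], _ => 0
  | t :: rest, last =>
    (if t = "user_input" ∧ last = some "user_input" then 1 else 0) + pvG rest (some t)

-- adjacent-pair count, the common middle ground of both proofs
def pvP : List String → Int
  | [] => 0
  | [_] => 0
  | t :: u :: rest =>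
    (if t = "user_input" ∧ u = "user_input" then 1 else 0) + pvP (u :: rest)

lemma pvALoop_eq (events : List (List (String × String))) :
    ∀ acc last, pvALoop events acc last
      = acc + pvG (events.map (fun e => (PySem.Dict.mk e).getD "type" "")) last := by
  induction events with
  | nil => intro acc last; simp [pvALoop, pvG]
  | cons e rest ih =>
    intro acc last
    simp only [pvALoop, List.map_cons, pvG, ih]
    split_ifs <;> ring

lemma pvG_eq (ts : List String) : ∀ last, pvG ts last
    = pvP ts + (match ts with
                | t :: _ => if t = "user_input" ∧ last = some "user_input" then (1 : Int) else 0
                | [] => 0) := by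
  induction ts with
  | nil => intro last; simp [pvG, pvP]
  | cons t rest ih =>
    intro last
    cases rest with
    | nil => simp [pvG, pvP]
    | cons u rs =>
      rw [show pvG (t :: u :: rs) last
            = (if t = "user_input" ∧ last = some "user_input" then (1:Int) else 0)
              + pvG (u :: rs) (some t) from rfl,
          ih (some t), pvP]
      simp only [Option.some.injEq]
      rw [show (if u = "user_input" ∧ t = "user_input" then (1:Int) else 0)
            = (if t = "user_input" ∧ u = "user_input" then (1:Int) else 0) by
          simp [and_comm]]
      ring

lemma pvRuns_nil : pvRuns [] = 0 := by rw [pvRuns.eq_def]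

lemma pvRuns_cons (t : String) (rest : List String) :
    pvRuns (t :: rest)
      = (if t = "user_input" then ((rest.takeWhile (· == t)).length : Int) else 0)
        + pvRuns (rest.dropWhile (· == t)) := by rw [pvRuns.eq_def]

lemma pvRuns_step (rest : List String) : ∀ t : String,
    (if t = "user_input" then ((rest.takeWhile (· == t)).length : Int) else 0)
      + pvRuns (rest.dropWhile (· == t)) = pvP (t :: rest) := by
  induction rest with
  | nil => intro t; simp [pvRuns_nil, pvP]
  | cons u rs ih =>
    intro t
    by_cases h : u = t
    · subst h
      simp only [List.takeWhile_cons, List.dropWhile_cons, beq_self_eq_true, if_true,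
        List.length_cons, pvP]
      rw [← ih u]
      push_cast
      split_ifs <;> simp_all; ring
    · have hb : (u == t) = false := by simp [h]
      simp only [List.takeWhile_cons, List.dropWhile_cons, hb, if_false, Bool.false_eq_true,
        List.length_nil]
      rw [show pvP (t :: u :: rs)
            = (if t = "user_input" ∧ u = "user_input" then (1:Int) else 0) + pvP (u :: rs)
          from rfl, ← ih u, pvRuns_cons]
      have : ¬ (t = "user_input" ∧ u = "user_input") := by
        rintro ⟨h1, h2⟩; exact h (h2.trans h1.symm)
      simp [this]

lemma pvRuns_eq_pvP (ts : List String) : pvRuns ts = pvP ts := by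
  cases ts with
  | nil => simp [pvRuns_nil, pvP]
  | cons t rest => rw [pvRuns_cons]; exact pvRuns_step rest t

-- ===== VERDICT (by name: the statement is the Claim_ definition above) =====
theorem count_interruptions_py_spec : Claim_equal_count_interruptions_py := by
  intro events _ _
  unfold Spec_count_interruptions_py count_interruptions_py count_interruptions_py_alt
  rw [pvALoop_eq, pvG_eq, pvRuns_eq_pvP]
  cases h : events.map (fun e => (PySem.Dict.mk e).getD "type" "") <;> simp
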